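-- pv_equiv track=rewrite | github.com/Shukry7/AI-Driven-Legal-system | backend/app/services/text_merge_service.py | map_clean_position_to_tagged
-- ===== SOURCE A (Python) =====
-- def map_clean_position_to_tagged(clean_pos: int, original_clean: str, original_tagged: str) -> int:
--     """
--     Map a character position in clean text to the corresponding position in tagged text.
--
--     This accounts for formatting tags that exist in tagged but not in clean text.
--
--     Args:
--         clean_pos: Position in clean text
--         original_clean: Original clean text
--         original_tagged: Original tagged text
--
--     Returns:
--         int: Corresponding position in tagged text
--     """
--     # If clean text is identical to tagged text, position is the same
--     if original_clean == original_tagged: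
--         return clean_pos
--
--     # Build a mapping by iterating through both texts
--     clean_idx = 0
--     tagged_idx = 0
--
--     while clean_idx < clean_pos and tagged_idx < len(original_tagged):
--         # Check if we're at a formatting tag in tagged text
--         if original_tagged[tagged_idx:].startswith('<<F:'):
--             # Skip the opening tag
--             end_tag = original_tagged.find('>>', tagged_idx)
--             if end_tag != -1:
--                 tagged_idx = end_tag + 2
--                 continue
--         elif original_tagged[tagged_idx:].startswith('<</F>>'):
--             # Skip the closing tag
--             tagged_idx += 6
--             continue
--         elif original_tagged[tagged_idx:].startswith('<<CENTER>>'):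
--             # Skip centering tag
--             tagged_idx += 10
--             continue
--         elif original_tagged[tagged_idx:].startswith('<</CENTER>>'):
--             # Skip centering close tag
--             tagged_idx += 11
--             continue
--         elif original_tagged[tagged_idx:].startswith('<<BOLD>>'):
--             # Skip legacy bold tag
--             tagged_idx += 8
--             continue
--         elif original_tagged[tagged_idx:].startswith('<</BOLD>>'):
--             # Skip legacy bold close tag
--             tagged_idx += 9
--             continue
--
--         # Regular character - should match
--         if clean_idx < len(original_clean) and tagged_idx < len(original_tagged):
--             # Verify characters match
--             clean_char = original_clean[clean_idx]
--             tagged_char = original_tagged[tagged_idx]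
--
--             if clean_char == tagged_char:
--                 clean_idx += 1
--                 tagged_idx += 1
--             else:
--                 # Mismatch - just advance both (shouldn't happen in well-formed data)
--                 clean_idx += 1
--                 tagged_idx += 1
--         else:
--             break
--
--     return tagged_idx
-- ===== SOURCE B (Python) =====
-- def _tag_len(s, i):
--     """Length of the formatting tag starting at position i of s, or 0 if none."""
--     if s.startswith('<<F:', i):
--         j = s.find('>>', i)
--         return j + 2 - i if j != -1 else 0
--     for t in ('<</F>>', '<<CENTER>>', '<</CENTER>>', '<<BOLD>>', '<</BOLD>>'):
--         if s.startswith(t, i):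
--             return len(t)
--     return 0
--
--
-- def map_clean_position_to_tagged(clean_pos: int, original_clean: str, original_tagged: str) -> int:
--     if original_clean == original_tagged:
--         return clean_pos
--
--     # Phase 1: tokenize the tagged text once into spans (is_tag, length),
--     # merging consecutive literal characters into one run.
--     spans = []
--     i = 0
--     n = len(original_tagged)
--     while i < n:
--         L = _tag_len(original_tagged, i)
--         if L:
--             spans.append((True, L))
--             i += L
--         else:
--             if spans and not spans[-1][0]:
--                 spans[-1] = (False, spans[-1][1] + 1)
--             else:
--                 spans.append((False, 1))
--             i += 1
--
--     # Phase 2: walk the spans, skipping tags while chars remain to consume and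
--     # jumping over literal runs arithmetically.
--     tagged_idx = 0
--     count = 0
--     clen = len(original_clean)
--     for is_tag, L in spans:
--         if is_tag:
--             if count < clean_pos:
--                 tagged_idx += L
--             else:
--                 return tagged_idx
--         else:
--             step = min(L, max(0, min(clean_pos - count, clen - count)))
--             if step < L:
--                 return tagged_idx + step
--             count += L
--             tagged_idx += L
--     return tagged_idx
-- ===== Notes on version B (the rewrite author's own statement) =====
-- stated objective: alternative
-- what changed: B tokenizes the tagged text once into an ordered list of tag/literal-run spans and then walks the spans, skipping whole tags and jumping over literal runs with a single min() arithmetic step, instead of A's single char-by-char while loop that re-tests every tag prefix at each position.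
import Mathlib
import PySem

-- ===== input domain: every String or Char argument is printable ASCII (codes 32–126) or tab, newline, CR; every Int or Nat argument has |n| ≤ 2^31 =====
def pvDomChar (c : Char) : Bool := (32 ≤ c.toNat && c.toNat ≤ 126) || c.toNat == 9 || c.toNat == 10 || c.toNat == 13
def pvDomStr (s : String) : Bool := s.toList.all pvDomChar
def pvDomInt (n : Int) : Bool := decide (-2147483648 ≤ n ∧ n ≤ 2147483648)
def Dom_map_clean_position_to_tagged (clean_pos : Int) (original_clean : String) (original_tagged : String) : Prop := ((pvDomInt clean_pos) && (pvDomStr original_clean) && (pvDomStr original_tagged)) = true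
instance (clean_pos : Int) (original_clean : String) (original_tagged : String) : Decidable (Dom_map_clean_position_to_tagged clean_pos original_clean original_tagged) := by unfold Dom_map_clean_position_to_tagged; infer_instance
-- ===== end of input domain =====

-- B tokenizes the tagged text once into tag/text spans and walks them with arithmetic jumps over
-- literal runs, instead of A's single char-by-char while loop (objective: alternative decomposition).


-- ===== PORT A =====

-- original_tagged.find('>>', i) relative to the suffix: first k with '>>' at position k, none = -1
def pvFindGG : List Char → Option Nat
  | [] => none
  | c :: t => if ['>', '>'].isPrefixOf (c :: t) then some 0 else (pvFindGG t).map (· + 1)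

-- A's while loop; S is the suffix original_tagged[tagged_idx:], so 'tagged_idx < len(original_tagged)'
-- is 'S ≠ []' and startswith/find act on S. Transliterated branch for branch.
def pvLoopA (C : List Char) (cpos : Int) (ci ti : Nat) (S : List Char) : Nat :=
  if h : (ci : Int) < cpos ∧ S ≠ [] then
    if "<<F:".toList.isPrefixOf S then
      match _hf : pvFindGG S with
      | some k => pvLoopA C cpos ci (ti + (k + 2)) (S.drop (k + 2))   -- tagged_idx = end_tag + 2
      | none =>    -- end_tag == -1: fall through to the regular-character step
        if ci < C.length ∧ S ≠ [] then
          if C.getD ci ' ' == S.headD ' ' then pvLoopA C cpos (ci + 1) (ti + 1) S.tail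
          else pvLoopA C cpos (ci + 1) (ti + 1) S.tail
        else ti
    else if "<</F>>".toList.isPrefixOf S then pvLoopA C cpos ci (ti + 6) (S.drop 6)
    else if "<<CENTER>>".toList.isPrefixOf S then pvLoopA C cpos ci (ti + 10) (S.drop 10)
    else if "<</CENTER>>".toList.isPrefixOf S then pvLoopA C cpos ci (ti + 11) (S.drop 11)
    else if "<<BOLD>>".toList.isPrefixOf S then pvLoopA C cpos ci (ti + 8) (S.drop 8)
    else if "<</BOLD>>".toList.isPrefixOf S then pvLoopA C cpos ci (ti + 9) (S.drop 9)
    else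
      if ci < C.length ∧ S ≠ [] then
        if C.getD ci ' ' == S.headD ' ' then pvLoopA C cpos (ci + 1) (ti + 1) S.tail
        else pvLoopA C cpos (ci + 1) (ti + 1) S.tail
      else ti
  else ti
termination_by S.length
decreasing_by
  all_goals
    have hpos : 0 < S.length := List.length_pos_of_ne_nil h.2
    simp [List.length_drop, List.length_tail] <;> omega

def map_clean_position_to_tagged (clean_pos : Int) (original_clean : String) (original_tagged : String) : Int :=
  if original_clean = original_tagged then clean_pos
  else (pvLoopA original_clean.toList clean_pos 0 0 original_tagged.toList : Int)

-- ===== PORT B =====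

-- _tag_len: length of the tag starting here, none if no tag starts here
def pvTagLen (S : List Char) : Option Nat :=
  if "<<F:".toList.isPrefixOf S then (pvFindGG S).map (· + 2)
  else if "<</F>>".toList.isPrefixOf S then some 6
  else if "<<CENTER>>".toList.isPrefixOf S then some 10
  else if "<</CENTER>>".toList.isPrefixOf S then some 11
  else if "<<BOLD>>".toList.isPrefixOf S then some 8
  else if "<</BOLD>>".toList.isPrefixOf S then some 9
  else none

theorem pvTagLen_pos {S : List Char} {L : Nat} (h : pvTagLen S = some L) : 0 < L := by
  unfold pvTagLen at h
  split_ifs at h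
  · cases hf : pvFindGG S <;> simp [hf] at h <;> omega
  all_goals (cases h; omega)

-- merging a fresh literal character into the span list of the rest
def pvMergeText (sp : List (Bool × Nat)) : List (Bool × Nat) :=
  match sp with
  | (false, m) :: r => (false, m + 1) :: r
  | _ => (false, 1) :: sp

-- phase 1: spans of the tagged text, (true, L) = tag of length L, (false, L) = run of L literal chars
def pvSpans : List Char → List (Bool × Nat)
  | [] => []
  | c :: t =>
    match _h : pvTagLen (c :: t) with
    | some L => (true, L) :: pvSpans ((c :: t).drop L)
    | none => pvMergeText (pvSpans t)
termination_by S => S.length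
decreasing_by
  · have := pvTagLen_pos _h
    simp [List.length_drop]; omega
  · simp

-- phase 2: walk the spans
def pvLoopB (clen : Nat) (cpos : Int) : List (Bool × Nat) → Nat → Nat → Nat
  | [], _, ti => ti
  | (true, L) :: rest, ci, ti =>
      if (ci : Int) < cpos then pvLoopB clen cpos rest ci (ti + L) else ti
  | (false, L) :: rest, ci, ti =>
      let step := min L (min ((cpos - (ci : Int)).toNat) (clen - ci))
      if step < L then ti + step else pvLoopB clen cpos rest (ci + L) (ti + L)

def map_clean_position_to_tagged_alt (clean_pos : Int) (original_clean : String) (original_tagged : String) : Int :=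
  if original_clean = original_tagged then clean_pos
  else (pvLoopB original_clean.toList.length clean_pos (pvSpans original_tagged.toList) 0 0 : Int)

-- ===== PRECONDITION & SPEC =====
def Spec_map_clean_position_to_tagged (clean_pos : Int) (original_clean : String) (original_tagged : String) (out : Int) : Prop := out = map_clean_position_to_tagged_alt clean_pos original_clean original_tagged
instance (clean_pos : Int) (original_clean : String) (original_tagged : String) (out : Int) : Decidable (Spec_map_clean_position_to_tagged clean_pos original_clean original_tagged out) := by unfold Spec_map_clean_position_to_tagged; infer_instance

-- ===== CLAIM (what is proved, stated in full; the proofs are below) =====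
def Claim_equal_map_clean_position_to_tagged : Prop := ∀ (clean_pos : Int) (original_clean : String) (original_tagged : String), Dom_map_clean_position_to_tagged clean_pos original_clean original_tagged → Spec_map_clean_position_to_tagged clean_pos original_clean original_tagged (map_clean_position_to_tagged clean_pos original_clean original_tagged)

-- ===== LEMMAS AND PROOFS =====

-- under the loop guard, a tag at the head of S makes A's loop skip it in one step
theorem loopA_step_tag {C : List Char} {cpos : Int} {ci ti : Nat} {S : List Char} {L : Nat}
    (hc : (ci : Int) < cpos) (hS : S ≠ []) (hL : pvTagLen S = some L) :
    pvLoopA C cpos ci ti S = pvLoopA C cpos ci (ti + L) (S.drop L) := by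
  rw [pvLoopA, dif_pos ⟨hc, hS⟩]
  unfold pvTagLen at hL
  split_ifs at hL with h1 h2 h3 h4 h5 h6
  · rw [if_pos h1]
    split
    · rename_i k heq
      rw [heq] at hL; simp at hL
      rw [← hL]
    · rename_i heq
      rw [heq] at hL; simp at hL
  · rw [if_neg h1, if_pos h2]; cases hL; rfl
  · rw [if_neg h1, if_neg h2, if_pos h3]; cases hL; rfl
  · rw [if_neg h1, if_neg h2, if_neg h3, if_pos h4]; cases hL; rfl
  · rw [if_neg h1, if_neg h2, if_neg h3, if_neg h4, if_pos h5]; cases hL; rfl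
  · rw [if_neg h1, if_neg h2, if_neg h3, if_neg h4, if_neg h5, if_pos h6]; cases hL; rfl

-- under the loop guard, no tag at the head of S makes A's loop take the character step
theorem loopA_step_char {C : List Char} {cpos : Int} {ci ti : Nat} {S : List Char}
    (hc : (ci : Int) < cpos) (hS : S ≠ []) (hL : pvTagLen S = none) :
    pvLoopA C cpos ci ti S =
      if ci < C.length then pvLoopA C cpos (ci + 1) (ti + 1) S.tail else ti := by
  rw [pvLoopA, dif_pos ⟨hc, hS⟩]
  unfold pvTagLen at hL
  split_ifs at hL with h1 h2 h3 h4 h5 h6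
  · rw [if_pos h1]
    have hf : pvFindGG S = none := by
      cases hf' : pvFindGG S
      · rfl
      · rw [hf'] at hL; simp at hL
    split
    · rename_i k heq; rw [heq] at hf; cases hf
    · simp [hS, ite_self]
  · rw [if_neg h1, if_neg h2, if_neg h3, if_neg h4, if_neg h5, if_neg h6]
    simp [hS, ite_self]

-- consuming one literal character through the merged span list
theorem loopB_merge (clen : Nat) (cpos : Int) (sp : List (Bool × Nat)) (ci ti : Nat) :
    pvLoopB clen cpos (pvMergeText sp) ci ti =
      if (ci : Int) < cpos ∧ ci < clen then pvLoopB clen cpos sp (ci + 1) (ti + 1) else ti := by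
  match sp with
  | (false, m) :: r =>
    simp only [pvMergeText, pvLoopB]
    split_ifs
    all_goals try omega
    have e1 : ci + (m + 1) = ci + 1 + m := by omega
    have e2 : ti + (m + 1) = ti + 1 + m := by omega
    rw [e1, e2]
  | [] =>
    simp only [pvMergeText, pvLoopB]
    split_ifs
    all_goals omega
  | (true, L') :: r =>
    simp only [pvMergeText, pvLoopB]
    split_ifs
    all_goals try rfl
    all_goals omega

-- the core loop equivalence
theorem loop_eq (C : List Char) (cpos : Int) :
    ∀ (n : Nat) (S : List Char), S.length ≤ n → ∀ (ci ti : Nat),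
      pvLoopA C cpos ci ti S = pvLoopB C.length cpos (pvSpans S) ci ti := by
  intro n
  induction n with
  | zero =>
    intro S hS ci ti
    have hnil : S = [] := by
      cases S with
      | nil => rfl
      | cons c t => simp at hS
    subst hnil
    rw [pvLoopA]
    simp [pvSpans, pvLoopB]
  | succ n ih =>
    intro S hS ci ti
    match S with
    | [] =>
      rw [pvLoopA]; simp [pvSpans, pvLoopB]
    | c :: t =>
      by_cases hc : (ci : Int) < cpos
      · cases hL : pvTagLen (c :: t) with
        | some L =>
          rw [loopA_step_tag hc (by simp) hL]
          have hpos := pvTagLen_pos hL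
          rw [ih ((c :: t).drop L) (by simp [List.length_drop]; simp at hS; omega)]
          conv_rhs => rw [pvSpans]
          rw [hL]
          simp only [pvLoopB, if_pos hc]
        | none =>
          rw [loopA_step_char hc (by simp) hL]
          conv_rhs => rw [pvSpans]
          rw [hL, loopB_merge]
          by_cases hclen : ci < C.length
          · rw [if_pos hclen, if_pos ⟨hc, hclen⟩]
            exact ih t (by simp at hS; omega) (ci + 1) (ti + 1)
          · rw [if_neg hclen, if_neg (fun hh => hclen hh.2)]
      · rw [pvLoopA, dif_neg (fun hh => hc hh.1)]
        cases hL : pvTagLen (c :: t) with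
        | some L =>
          conv_rhs => rw [pvSpans]
          rw [hL]
          simp [pvLoopB, hc]
        | none =>
          conv_rhs => rw [pvSpans]
          rw [hL, loopB_merge]
          simp [hc]

-- ===== VERDICT (by name: the statement is the Claim_ definition above) =====
theorem map_clean_position_to_tagged_spec : Claim_equal_map_clean_position_to_tagged := by
  intro cpos clean tagged _
  unfold Spec_map_clean_position_to_tagged
  unfold map_clean_position_to_tagged map_clean_position_to_tagged_alt
  split_ifs with h
  · rfl
  · exact congrArg _ (loop_eq clean.toList cpos tagged.toList.length tagged.toList le_rfl 0 0)
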